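-- pv_equiv track=rewrite | github.com/jki14/competitive-programming | 2020/withgoogle.com/codejam/round1a/proa.py | solution
-- ===== SOURCE A (Python) =====
-- def match(lhs, rhs):
--     size = min(len(lhs), len(rhs))
--     return lhs[:size] == rhs[:size]
--
-- def solution(a):
--     head = ''
--     tail = ''
--     body = ''
--     for pat in a:
--         pre = pat.split('*')[0]
--         if not match(pre, head):
--             return '*'
--         if len(head) < len(pre):
--             head = pre
--         suf = pat.split('*')[-1]
--         if not match(suf[::-1], tail[::-1]):
--             return '*'
--         if len(tail) < len(suf):
--             tail = suf
--         for mid in pat.split('*')[1:-1]: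
--             body += mid
--     return head + body + tail
-- ===== SOURCE B (Python) =====
-- def solution(a):
--     parts = [p.split('*') for p in a]
--     pres = sorted((q[0] for q in parts), key=len)
--     sufs = sorted((q[-1][::-1] for q in parts), key=len)
--     for xs in (pres, sufs):
--         for u, v in zip(xs, xs[1:]):
--             if not v.startswith(u):
--                 return '*'
--     head = pres[-1] if pres else ''
--     tail = sufs[-1][::-1] if sufs else ''
--     return head + ''.join(m for q in parts for m in q[1:-1]) + tail
-- ===== Notes on version B (the rewrite author's own statement) =====
-- stated objective: alternative
-- what changed: A's single fused loop that maintains a running longest prefix/suffix/body with an early return '*' is replaced by a sort-then-scan algorithm: the per-pattern prefix segments (and the reversed suffix segments) are sorted by length, compatibility is checked only between ADJACENT pairs of the sorted list (a chain of startswith checks, correct because comparability with a neighbour of no smaller length plus transitivity of the prefix order gives pairwise comparability), and the longest segment is then simply the last element of the sorted list.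
import Mathlib
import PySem

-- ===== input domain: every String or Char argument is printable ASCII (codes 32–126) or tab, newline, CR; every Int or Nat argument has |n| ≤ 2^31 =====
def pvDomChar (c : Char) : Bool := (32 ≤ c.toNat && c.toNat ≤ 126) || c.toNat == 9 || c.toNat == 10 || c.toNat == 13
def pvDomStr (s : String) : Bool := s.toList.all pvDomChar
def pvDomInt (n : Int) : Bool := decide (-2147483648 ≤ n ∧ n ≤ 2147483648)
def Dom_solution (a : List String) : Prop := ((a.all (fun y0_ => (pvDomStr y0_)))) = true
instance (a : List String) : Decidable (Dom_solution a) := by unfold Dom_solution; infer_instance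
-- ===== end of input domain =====

-- B replaces A's fused running-longest loop (with early `return '*'`) by a sort-then-scan
-- algorithm: sort the prefix segments (and reversed suffix segments) by length and check only
-- ADJACENT pairs form a prefix chain; the longest is then the last element; objective: alternative.

-- ===== PORT A =====
def pymatch (lhs rhs : String) : Bool :=
  let size : Int := min (PySem.Str.len lhs) (PySem.Str.len rhs)
  PySem.Str.slice lhs none (some size) == PySem.Str.slice rhs none (some size)

def solutionLoop : String → String → String → List String → String
  | head, tail, body, [] => head ++ body ++ tail
  | head, tail, body, pat :: rest =>
    let parts := (PySem.Str.split? pat "*").getD []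
    let pre := parts.headD ""
    if pymatch pre head = false then "*"
    else
      let head1 := if PySem.Str.len head < PySem.Str.len pre then pre else head
      let suf := parts.getLastD ""
      if pymatch ((PySem.Str.slice? suf none none (-1)).getD "")
                 ((PySem.Str.slice? tail none none (-1)).getD "") = false then "*"
      else
        let tail1 := if PySem.Str.len tail < PySem.Str.len suf then suf else tail
        let body1 := (PySem.List.slice parts (some 1) (some (-1))).foldl (fun b m => b ++ m) body
        solutionLoop head1 tail1 body1 rest

def solution (a : List String) : String := solutionLoop "" "" "" a

-- ===== PORT B =====
-- adjacent-pair check: every consecutive pair (u, v) of xs satisfies v.startswith(u)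
def chainOkB (xs : List String) : Bool :=
  (xs.zip (PySem.List.slice xs (some 1) none)).all (fun uv => PySem.Str.startswith uv.2 uv.1)

def solution_alt (a : List String) : String :=
  let parts := a.map (fun p => (PySem.Str.split? p "*").getD [])
  let pres := PySem.List.sorted (parts.map (fun q => q.headD "")) PySem.Str.len false
  let sufs := PySem.List.sorted
    (parts.map (fun q => (PySem.Str.slice? (q.getLastD "") none none (-1)).getD "")) PySem.Str.len false
  if !chainOkB pres then "*"
  else if !chainOkB sufs then "*"
  else
    let head := if pres.isEmpty then "" else pres.getLastD ""
    let tail := if sufs.isEmpty then ""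
                else (PySem.Str.slice? (sufs.getLastD "") none none (-1)).getD ""
    head ++ PySem.Str.join "" (parts.flatMap (fun q => PySem.List.slice q (some 1) (some (-1)))) ++ tail

-- ===== PRECONDITION & SPEC =====
def Spec_solution (a : List String) (out : String) : Prop := out = solution_alt a
instance (a : List String) (out : String) : Decidable (Spec_solution a out) := by unfold Spec_solution; infer_instance

-- ===== CLAIM (what is proved, stated in full; the proofs are below) =====
def Claim_equal_solution : Prop := ∀ (a : List String), Dom_solution a → Spec_solution a (solution a)

-- ===== LEMMAS AND PROOFS =====

-- canonical middle form both programs are reduced to: compute the longest prefix/suffix and verify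
def canonSol (a : List String) : String :=
  let parts := a.map (fun p => (PySem.Str.split? p "*").getD [])
  let prefixes := parts.map (fun q => q.headD "")
  let suffixes := parts.map (fun q => q.getLastD "")
  let head := PySem.List.maxD prefixes PySem.Str.len ""
  let tail := PySem.List.maxD suffixes PySem.Str.len ""
  if !(prefixes.all (fun p => PySem.Str.startswith head p)) then "*"
  else if !(suffixes.all (fun s => PySem.Str.endswith tail s)) then "*"
  else
    head ++ PySem.Str.join "" (parts.flatMap (fun q => PySem.List.slice q (some 1) (some (-1)))) ++ tail

def preOf (pat : String) : String := ((PySem.Str.split? pat "*").getD []).headD ""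

def sufOf (pat : String) : String := ((PySem.Str.split? pat "*").getD []).getLastD ""

def midsOf (pat : String) : List String :=
  PySem.List.slice ((PySem.Str.split? pat "*").getD []) (some 1) (some (-1))

def revS (s : String) : String := (PySem.Str.slice? s none none (-1)).getD ""

theorem solutionLoop_cons (h t b pat : String) (rest : List String) :
    solutionLoop h t b (pat :: rest) =
      (if pymatch (preOf pat) h = false then "*"
       else if pymatch (revS (sufOf pat)) (revS t) = false then "*"
       else solutionLoop
         (if PySem.Str.len h < PySem.Str.len (preOf pat) then preOf pat else h)
         (if PySem.Str.len t < PySem.Str.len (sufOf pat) then sufOf pat else t)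
         ((midsOf pat).foldl (fun u v => u ++ v) b) rest) := rfl

def runPre (h : String) : List String → Option String
  | [] => some h
  | p :: ps => if pymatch p h then runPre (if PySem.Str.len h < PySem.Str.len p then p else h) ps else none

def runSuf (t : String) : List String → Option String
  | [] => some t
  | s :: ss => if pymatch (revS s) (revS t) then
      runSuf (if PySem.Str.len t < PySem.Str.len s then s else t) ss else none

def maxsel (h p : List Char) : List Char := if (h.length : Int) < p.length then p else h

def runL (h : List Char) : List (List Char) → Option (List Char)
  | [] => some h
  | p :: ps => if p <+: h ∨ h <+: p then runL (maxsel h p) ps else none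

theorem loop_eq (rest : List String) : ∀ h t b,
    solutionLoop h t b rest =
      (match runPre h (rest.map preOf), runSuf t (rest.map sufOf) with
       | some H, some T =>
           H ++ (rest.foldl (fun bb pat => (midsOf pat).foldl (fun u v => u ++ v) bb) b) ++ T
       | _, _ => "*") := by
  induction rest with
  | nil => intro h t b; simp [solutionLoop, runPre, runSuf]
  | cons pat rest ih =>
    intro h t b
    rw [solutionLoop_cons, List.map_cons, List.map_cons, runPre, runSuf, List.foldl_cons]
    by_cases hp : pymatch (preOf pat) h
    · rw [if_pos hp, if_neg (by simp [hp])]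
      by_cases hs : pymatch (revS (sufOf pat)) (revS t)
      · rw [if_pos hs, if_neg (by simp [hs]), ih]
      · rw [if_neg hs, if_pos (by simp [hs])]
        cases runPre (if PySem.Str.len h < PySem.Str.len (preOf pat) then preOf pat else h)
            (rest.map preOf) <;> rfl
    · rw [if_neg hp, if_pos (by simp [hp])]

theorem take_min_eq_iff (x y : List Char) :
    x.take (min x.length y.length) = y.take (min x.length y.length) ↔ (x <+: y ∨ y <+: x) := by
  rcases Nat.le_total x.length y.length with h | h
  · rw [Nat.min_eq_left h, List.take_of_length_le (le_refl _)]
    constructor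
    · intro he; exact Or.inl (he ▸ List.take_prefix _ _)
    · rintro (hp | hp)
      · exact (List.prefix_iff_eq_take.mp hp)
      · have : y = x := hp.eq_of_length_le h
        subst this; simp
  · rw [Nat.min_eq_right h, List.take_of_length_le (le_refl _)]
    constructor
    · intro he; exact Or.inr (he ▸ List.take_prefix _ _)
    · rintro (hp | hp)
      · have : x = y := hp.eq_of_length_le h
        subst this; simp
      · exact (List.prefix_iff_eq_take.mp hp).symm

theorem pymatch_iff (x y : String) :
    pymatch x y = true ↔ (x.toList <+: y.toList ∨ y.toList <+: x.toList) := by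
  have hsz : (0:Int) ≤ min (PySem.Str.len x) (PySem.Str.len y) := by
    simp [PySem.Str.len]
  have htn : (min (PySem.Str.len x) (PySem.Str.len y)).toNat = min x.toList.length y.toList.length := by
    simp [PySem.Str.len]; omega
  rw [pymatch, beq_iff_eq, ← String.toList_inj]
  simp only [PySem.Str.toList_slice, PySem.Chars.slice_eq_listSlice,
    PySem.List.slice_to _ hsz, htn]
  exact take_min_eq_iff x.toList y.toList

theorem revS_toList (s : String) : (revS s).toList = s.toList.reverse := by
  simp [revS, PySem.Str.slice?, pysem]

theorem runPre_map (ps : List String) : ∀ h : String,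
    (runPre h ps).map String.toList = runL h.toList (ps.map String.toList) := by
  induction ps with
  | nil => intro h; simp [runPre, runL]
  | cons p ps ih =>
    intro h
    rw [List.map_cons, runPre, runL]
    by_cases hm : pymatch p h
    · rw [if_pos hm, if_pos ((pymatch_iff p h).mp hm), ih]
      congr 1
      simp only [maxsel, PySem.Str.len]
      split_ifs with h1 <;> rfl
    · rw [if_neg hm, if_neg (fun hc => hm ((pymatch_iff p h).mpr hc))]
      rfl

theorem runSuf_map (ss : List String) : ∀ t : String,
    (runSuf t ss).map (fun s => s.toList.reverse)
      = runL t.toList.reverse (ss.map (fun s => s.toList.reverse)) := by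
  induction ss with
  | nil => intro t; simp [runSuf, runL]
  | cons s ss ih =>
    intro t
    rw [List.map_cons, runSuf, runL]
    by_cases hm : pymatch (revS s) (revS t)
    · have hc := (pymatch_iff (revS s) (revS t)).mp hm
      rw [revS_toList, revS_toList] at hc
      rw [if_pos hm, if_pos hc, ih]
      have hc2 : maxsel t.toList.reverse s.toList.reverse
          = (if PySem.Str.len t < PySem.Str.len s then s else t).toList.reverse := by
        unfold maxsel
        by_cases h : PySem.Str.len t < PySem.Str.len s
        · rw [if_pos h, if_pos (by simpa [PySem.Str.len] using h)]
        · rw [if_neg h, if_neg (by simpa [PySem.Str.len] using h)]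
      rw [hc2]
    · have hc : ¬ (s.toList.reverse <+: t.toList.reverse ∨ t.toList.reverse <+: s.toList.reverse) := by
        intro hc
        exact hm ((pymatch_iff (revS s) (revS t)).mpr (by rw [revS_toList, revS_toList]; exact hc))
      rw [if_neg hm, if_neg hc]
      rfl

theorem runL_some (ps : List (List Char)) : ∀ h H, runL h ps = some H →
    (h <+: H ∧ ∀ p ∈ ps, p <+: H) ∧ List.foldl maxsel h ps = H := by
  induction ps with
  | nil => intro h H hr; simp [runL] at hr; subst hr; simp
  | cons p ps ih =>
    intro h H hr
    simp only [runL] at hr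
    split_ifs at hr with hc
    obtain ⟨⟨hh, hall⟩, hfold⟩ := ih _ _ hr
    have hph : p <+: maxsel h p := by
      unfold maxsel; split_ifs with hl
      · exact List.prefix_refl p
      · rcases hc with hc | hc
        · exact hc
        · have : h = p := hc.eq_of_length_le (by omega)
          subst this; exact List.prefix_refl _
    have hhh : h <+: maxsel h p := by
      unfold maxsel; split_ifs with hl
      · rcases hc with hc | hc
        · have : p = h := hc.eq_of_length_le (by omega)
          subst this; exact List.prefix_refl _
        · exact hc
      · exact List.prefix_refl _
    refine ⟨⟨hhh.trans hh, ?_⟩, by simpa using hfold⟩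
    intro q hq
    rcases List.mem_cons.mp hq with rfl | hq
    · exact hph.trans hh
    · exact hall _ hq

theorem runL_some_of_bound (ps : List (List Char)) : ∀ h M, h <+: M → (∀ p ∈ ps, p <+: M) →
    runL h ps = some (List.foldl maxsel h ps) := by
  induction ps with
  | nil => intro h M _ _; simp [runL]
  | cons p ps ih =>
    intro h M hh hall
    have hp : p <+: M := hall p (by simp)
    have hc : p <+: h ∨ h <+: p := List.prefix_or_prefix_of_prefix hp hh
    simp only [runL, if_pos hc, List.foldl_cons]
    have hm : maxsel h p <+: M := by
      unfold maxsel; split_ifs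
      · exact hp
      · exact hh
    exact ih _ M hm (fun q hq => hall q (by simp [hq]))

theorem max?_map {α β κ : Type} [LT κ] [DecidableLT κ] (f : α → β) (key : β → κ) (xs : List α) :
    PySem.List.max? (xs.map f) key = (PySem.List.max? xs (fun x => key (f x))).map f := by
  unfold PySem.List.max?
  rw [List.foldl_map]
  have aux : ∀ (qs : List α) (acc : Option α),
      List.foldl (fun acc x => match acc with
        | none => some (f x)
        | some m => if key m < key (f x) then some (f x) else some m) (acc.map f) qs
      = (List.foldl (fun acc x => match acc with
        | none => some x
        | some m => if key (f m) < key (f x) then some x else some m) acc qs).map f := by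
    intro qs
    induction qs with
    | nil => intro acc; rfl
    | cons q qs ihq =>
      intro acc
      cases acc with
      | none => simpa using ihq (some q)
      | some m =>
        simp only [List.foldl_cons, Option.map_some]
        split_ifs <;> [exact ihq (some q); exact ihq (some m)]
  simpa using aux xs none

theorem max?_cons_cons {κ : Type} [LT κ] [DecidableLT κ] (key : List Char → κ) (m q : List Char) (qs : List (List Char)) (hkey : ∀ x y, key x < key y ↔ (x.length : Int) < y.length) :
    PySem.List.max? (m :: q :: qs) key = PySem.List.max? (maxsel m q :: qs) key := by
  unfold PySem.List.max?
  simp only [List.foldl_cons]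
  congr 1
  show (if key m < key q then some q else some m) = some (maxsel m q)
  unfold maxsel
  by_cases h : (m.length : Int) < q.length
  · rw [if_pos ((hkey m q).mpr h), if_pos h]
  · rw [if_neg (fun hx => h ((hkey m q).mp hx)), if_neg h]

theorem max?_eq_foldl_maxsel (qs : List (List Char)) : ∀ m : List Char,
    PySem.List.max? (m :: qs) (fun l => (l.length : Int)) = some (List.foldl maxsel m qs) := by
  induction qs with
  | nil => intro m; rfl
  | cons q qs ih =>
    intro m
    rw [max?_cons_cons _ m q qs (fun x y => Iff.rfl), ih, List.foldl_cons]

theorem foldl_maxsel_eq_maxD (ps : List (List Char)) :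
    List.foldl maxsel [] ps = PySem.List.maxD ps (fun l => (l.length : Int)) [] := by
  cases ps with
  | nil => rfl
  | cons p ps =>
    unfold PySem.List.maxD
    rw [max?_eq_foldl_maxsel ps p, Option.getD_some, List.foldl_cons]
    have h0 : maxsel [] p = p := by
      unfold maxsel
      split_ifs with h
      · rfl
      · have : p.length = 0 := by simpa using h
        simp [List.length_eq_zero_iff.mp this]
    rw [h0]

theorem runL_char (ps : List (List Char)) :
    runL [] ps =
      (if ps.all (fun p => decide (p <+: PySem.List.maxD ps (fun l => (l.length : Int)) [])) then
        some (PySem.List.maxD ps (fun l => (l.length : Int)) []) else none) := by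
  set M := PySem.List.maxD ps (fun l => (l.length : Int)) [] with hM
  by_cases hall : ∀ p ∈ ps, p <+: M
  · rw [if_pos (by simpa [List.all_eq_true] using hall)]
    rw [runL_some_of_bound ps [] M (by simp) hall, foldl_maxsel_eq_maxD]
  · rw [if_neg (by simpa [List.all_eq_true] using hall)]
    cases hr : runL [] ps with
    | none => rfl
    | some H =>
      exfalso
      obtain ⟨⟨_, hpre⟩, hfold⟩ := runL_some ps [] H hr
      rw [foldl_maxsel_eq_maxD] at hfold
      apply hall
      intro p hp
      rw [hM, hfold]
      exact hpre p hp

theorem foldl_append_toList (ms : List String) : ∀ b : String,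
    (ms.foldl (fun u v => u ++ v) b).toList = b.toList ++ (ms.map String.toList).flatten := by
  induction ms with
  | nil => intro b; simp
  | cons m ms ih => intro b; simp [ih, String.toList_append]

theorem body_toList (rest : List String) : ∀ b : String,
    (rest.foldl (fun bb pat => (midsOf pat).foldl (fun u v => u ++ v) bb) b).toList
      = b.toList ++ ((rest.flatMap midsOf).map String.toList).flatten := by
  induction rest with
  | nil => intro b; simp
  | cons pat rest ih =>
    intro b
    simp only [List.foldl_cons, ih, foldl_append_toList, List.flatMap_cons, List.map_append,
      List.flatten_append, List.append_assoc]

theorem join_nil_flatten (css : List (List Char)) :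
    PySem.Chars.join [] css = css.flatten := by
  induction css with
  | nil => exact PySem.Chars.join_nil []
  | cons c cs ih =>
    cases cs with
    | nil => simp [PySem.Chars.join_singleton]
    | cons d ds => rw [PySem.Chars.join_cons_cons, ih]; simp

theorem maxD_toList (xs : List String) :
    (PySem.List.maxD xs PySem.Str.len "").toList
      = PySem.List.maxD (xs.map String.toList) (fun l => (l.length : Int)) [] := by
  unfold PySem.List.maxD
  rw [max?_map]
  have hk : PySem.List.max? xs (fun x => ((String.toList x).length : Int))
      = PySem.List.max? xs PySem.Str.len := rfl
  rw [hk]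
  cases PySem.List.max? xs PySem.Str.len <;> rfl

theorem maxD_toList_rev (xs : List String) :
    (PySem.List.maxD xs PySem.Str.len "").toList.reverse
      = PySem.List.maxD (xs.map (fun s => s.toList.reverse)) (fun l => (l.length : Int)) [] := by
  unfold PySem.List.maxD
  rw [max?_map]
  have hk : PySem.List.max? xs (fun x => (((fun (s : String) => s.toList.reverse) x).length : Int))
      = PySem.List.max? xs PySem.Str.len := by
    congr 1
    funext s
    simp [PySem.Str.len]
  rw [hk]
  cases PySem.List.max? xs PySem.Str.len <;> rfl

theorem solution_eq_canon (a : List String) : solution a = canonSol a := by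
  unfold solution canonSol
  rw [loop_eq]
  have hpart : (a.map (fun p => (PySem.Str.split? p "*").getD [])).map (fun q => q.headD "")
      = a.map preOf := by rw [List.map_map]; congr 1
  have hpart' : (a.map (fun p => (PySem.Str.split? p "*").getD [])).map (fun q => q.getLastD "")
      = a.map sufOf := by rw [List.map_map]; congr 1
  have hmids : (a.map (fun p => (PySem.Str.split? p "*").getD [])).flatMap
      (fun q => PySem.List.slice q (some 1) (some (-1))) = a.flatMap midsOf := by
    rw [List.flatMap_map]; congr 1
  simp only [hpart, hpart', hmids]
  set pres := a.map preOf with hpres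
  set sufs := a.map sufOf with hsufs
  set H := PySem.List.maxD pres PySem.Str.len "" with hH
  set T := PySem.List.maxD sufs PySem.Str.len "" with hT
  have hA1 : (runPre "" pres).map String.toList = runL [] (pres.map String.toList) := by
    simpa using runPre_map pres ""
  have hA2 : (runSuf "" sufs).map (fun s => s.toList.reverse)
      = runL [] (sufs.map (fun s => s.toList.reverse)) := by
    simpa using runSuf_map sufs ""
  have hB1 := maxD_toList pres
  have hB2 := maxD_toList_rev sufs
  rw [runL_char] at hA1 hA2
  by_cases hok1 : ∀ p ∈ pres, p.toList <+: H.toList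
  · have hall1 : (pres.map String.toList).all
        (fun p => decide (p <+: PySem.List.maxD (pres.map String.toList) (fun l => (l.length : Int)) [])) = true := by
      simp only [List.all_map, List.all_eq_true]
      intro p hp
      simp only [Function.comp, decide_eq_true_eq, ← hB1]
      exact hok1 p hp
    rw [if_pos hall1] at hA1
    have hok1' : pres.all (fun p => PySem.Str.startswith H p) = true := by
      simp only [List.all_eq_true]
      intro p hp
      rw [PySem.Str.startswith_eq, PySem.Chars.startswith_iff]
      exact hok1 p hp
    by_cases hok2 : ∀ s ∈ sufs, s.toList <:+ T.toList
    · have hall2 : (sufs.map (fun s => s.toList.reverse)).all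
          (fun p => decide (p <+: PySem.List.maxD (sufs.map (fun s => s.toList.reverse)) (fun l => (l.length : Int)) [])) = true := by
        simp only [List.all_map, List.all_eq_true]
        intro s hs
        simp only [Function.comp, decide_eq_true_eq, ← hB2]
        simpa [List.reverse_prefix] using hok2 s hs
      rw [if_pos hall2] at hA2
      have hok2' : sufs.all (fun s => PySem.Str.endswith T s) = true := by
        simp only [List.all_eq_true]
        intro s hs
        rw [PySem.Str.endswith_eq, PySem.Chars.endswith_iff]
        exact hok2 s hs
      obtain ⟨H', hH'⟩ : ∃ H', runPre "" pres = some H' := by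
        cases h : runPre "" pres
        · rw [h] at hA1; simp at hA1
        · exact ⟨_, rfl⟩
      obtain ⟨T', hT'⟩ : ∃ T', runSuf "" sufs = some T' := by
        cases h : runSuf "" sufs
        · rw [h] at hA2; simp at hA2
        · exact ⟨_, rfl⟩
      have hHeq : H' = H := by
        rw [hH'] at hA1
        simp only [Option.map_some, Option.some.injEq] at hA1
        rw [← String.toList_inj, hA1, hB1]
      have hTeq : T' = T := by
        rw [hT'] at hA2
        simp only [Option.map_some, Option.some.injEq] at hA2
        rw [← String.toList_inj]
        have h2 := hA2.trans hB2.symm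
        simpa using congrArg List.reverse h2
      rw [hH', hT', hok1', hok2']
      simp only [Bool.not_true, Bool.false_eq_true, if_false]
      rw [hHeq, hTeq, ← String.toList_inj]
      simp only [String.toList_append, body_toList, PySem.Str.toList_join,
        join_nil_flatten, String.toList_empty]
      simp
    · have hall2 : ¬ ((sufs.map (fun s => s.toList.reverse)).all
          (fun p => decide (p <+: PySem.List.maxD (sufs.map (fun s => s.toList.reverse)) (fun l => (l.length : Int)) [])) = true) := by
        simp only [List.all_map, List.all_eq_true]
        intro hx
        apply hok2
        intro s hs
        have h3 := hx s hs
        simp only [Function.comp, decide_eq_true_eq, ← hB2] at h3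
        simpa [List.reverse_prefix] using h3
      rw [if_neg hall2] at hA2
      have hT2 : runSuf "" sufs = none := by
        cases h : runSuf "" sufs
        · rfl
        · rw [h] at hA2; simp at hA2
      have hok2' : ¬ (sufs.all (fun s => PySem.Str.endswith T s) = true) := by
        simp only [List.all_eq_true]
        intro hx
        apply hok2
        intro s hs
        have h3 := hx s hs
        rwa [PySem.Str.endswith_eq, PySem.Chars.endswith_iff] at h3
      have hf2 : sufs.all (fun s => PySem.Str.endswith T s) = false := by
        cases h : sufs.all (fun s => PySem.Str.endswith T s)
        · rfl
        · exact absurd h hok2'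
      rw [hT2, hok1', hf2]
      simp only [Bool.not_true, Bool.not_false, Bool.false_eq_true, if_false, if_true]
      cases runPre "" pres <;> rfl
  · have hall1 : ¬ ((pres.map String.toList).all
        (fun p => decide (p <+: PySem.List.maxD (pres.map String.toList) (fun l => (l.length : Int)) [])) = true) := by
      simp only [List.all_map, List.all_eq_true]
      intro hx
      apply hok1
      intro p hp
      have h3 := hx p hp
      simpa only [Function.comp, decide_eq_true_eq, ← hB1] using h3
    rw [if_neg hall1] at hA1
    have hP : runPre "" pres = none := by
      cases h : runPre "" pres
      · rfl
      · rw [h] at hA1; simp at hA1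
    have hok1' : ¬ (pres.all (fun p => PySem.Str.startswith H p) = true) := by
      simp only [List.all_eq_true]
      intro hx
      apply hok1
      intro p hp
      have h3 := hx p hp
      rwa [PySem.Str.startswith_eq, PySem.Chars.startswith_iff] at h3
    have hf1 : pres.all (fun p => PySem.Str.startswith H p) = false := by
      cases h : pres.all (fun p => PySem.Str.startswith H p)
      · rfl
      · exact absurd h hok1'
    rw [hP, hf1]
    simp only [Bool.not_false, if_true]

-- ===== B-side lemmas: the sorted adjacent chain is the all-prefix-of-the-longest condition =====

theorem chainOkB_cons_cons (x y : String) (t : List String) :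
    chainOkB (x :: y :: t) = (PySem.Str.startswith y x && chainOkB (y :: t)) := by
  simp [chainOkB, PySem.List.slice_from_one]

theorem chain_all_prefix_last : ∀ (S : List String), chainOkB S = true →
    ∀ p ∈ S, p.toList <+: (S.getLastD "").toList := by
  intro S
  induction S with
  | nil => intro _ p hp; simp at hp
  | cons x t ih =>
    cases t with
    | nil =>
      intro _ p hp
      rcases List.mem_singleton.mp hp with rfl
      simp [List.getLastD]
    | cons y u =>
      intro hc p hp
      rw [chainOkB_cons_cons, Bool.and_eq_true] at hc
      obtain ⟨hxy, hrest⟩ := hc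
      have hxy' : x.toList <+: y.toList := by
        rwa [PySem.Str.startswith_eq, PySem.Chars.startswith_iff] at hxy
      have hlast : (x :: y :: u).getLastD "" = (y :: u).getLastD "" := by
        simp [List.getLastD]
      rw [hlast]
      rcases List.mem_cons.mp hp with rfl | hp
      · exact hxy'.trans (ih hrest y (by simp))
      · exact ih hrest p hp

theorem chain_of_sorted_prefix (M : String) : ∀ (S : List String),
    S.Pairwise (fun a b => PySem.Str.len a ≤ PySem.Str.len b) →
    (∀ p ∈ S, p.toList <+: M.toList) → chainOkB S = true := by
  intro S
  induction S with
  | nil => intro _ _; rfl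
  | cons x t ih =>
    cases t with
    | nil => intro _ _; rfl
    | cons y u =>
      intro hpw hall
      obtain ⟨hx, hpw'⟩ := List.pairwise_cons.mp hpw
      have hlen : x.toList.length ≤ y.toList.length := by
        have := hx y (by simp)
        simpa [PySem.Str.len] using this
      have hxy : x.toList <+: y.toList :=
        List.prefix_of_prefix_length_le (hall x (by simp)) (hall y (by simp)) hlen
      rw [chainOkB_cons_cons, Bool.and_eq_true]
      refine ⟨by rwa [PySem.Str.startswith_eq, PySem.Chars.startswith_iff], ?_⟩
      exact ih hpw' (fun p hp => hall p (List.mem_cons_of_mem x hp))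

theorem getLastD_mem_of_ne_nil (l : List String) (h : l ≠ []) : l.getLastD "" ∈ l := by
  cases l with
  | nil => simp at h
  | cons x t =>
    rw [List.getLastD_eq_getLast?, List.getLast?_eq_some_getLast (l := x :: t) (by simp)]
    exact List.getLast_mem (by simp)

theorem maxD_spec (xs : List String) (hne : xs ≠ []) :
    PySem.List.maxD xs PySem.Str.len "" ∈ xs ∧
      ∀ y ∈ xs, PySem.Str.len y ≤ PySem.Str.len (PySem.List.maxD xs PySem.Str.len "") := by
  cases h : PySem.List.max? xs PySem.Str.len with
  | none => exact absurd ((PySem.List.max?_eq_none_iff xs PySem.Str.len).mp h) hne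
  | some m =>
    have hmem := PySem.List.max?_mem h
    have hmax := PySem.List.max?_isMax h
    have hd : PySem.List.maxD xs PySem.Str.len "" = m := by
      rw [PySem.List.maxD, h, Option.getD_some]
    rw [hd]
    exact ⟨hmem, hmax⟩

theorem sortedChain_iff (xs : List String) :
    chainOkB (PySem.List.sorted xs PySem.Str.len false) = true
      ↔ ∀ p ∈ xs, p.toList <+: (PySem.List.maxD xs PySem.Str.len "").toList := by
  constructor
  · intro h p hp
    have hne : xs ≠ [] := by rintro rfl; simp at hp
    set S := PySem.List.sorted xs PySem.Str.len false with hS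
    set L := S.getLastD "" with hL
    have hSne : S ≠ [] := by
      rw [hS]
      intro hx
      exact hne ((PySem.List.sorted_eq_nil_iff xs PySem.Str.len false).mp hx)
    have hmemS : ∀ q, q ∈ S ↔ q ∈ xs := fun q =>
      (PySem.List.sorted_perm xs PySem.Str.len false).mem_iff
    obtain ⟨hMmem, hMmax⟩ := maxD_spec xs hne
    set M := PySem.List.maxD xs PySem.Str.len "" with hM
    have hML : M.toList <+: L.toList :=
      chain_all_prefix_last S h M ((hmemS M).mpr hMmem)
    have hLlen : PySem.Str.len L ≤ PySem.Str.len M :=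
      hMmax L ((hmemS L).mp (getLastD_mem_of_ne_nil S hSne))
    have hEq : M.toList = L.toList := by
      refine hML.eq_of_length_le ?_
      simpa [PySem.Str.len] using hLlen
    rw [hEq]
    exact chain_all_prefix_last S h p ((hmemS p).mpr hp)
  · intro h
    refine chain_of_sorted_prefix (PySem.List.maxD xs PySem.Str.len "") _ (PySem.List.sorted_pairwise xs PySem.Str.len) ?_
    intro p hp
    exact h p ((PySem.List.sorted_perm xs PySem.Str.len false).mem_iff.mp hp)

theorem sortedLast_eq (xs : List String) (hne : xs ≠ [])
    (h : ∀ p ∈ xs, p.toList <+: (PySem.List.maxD xs PySem.Str.len "").toList) :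
    (PySem.List.sorted xs PySem.Str.len false).getLastD "" = PySem.List.maxD xs PySem.Str.len "" := by
  set S := PySem.List.sorted xs PySem.Str.len false with hS
  have hchain : chainOkB S = true := (sortedChain_iff xs).mpr h
  have hSne : S ≠ [] := by
    rw [hS]
    intro hx
    exact hne ((PySem.List.sorted_eq_nil_iff xs PySem.Str.len false).mp hx)
  have hmemS : ∀ q, q ∈ S ↔ q ∈ xs := fun q =>
    (PySem.List.sorted_perm xs PySem.Str.len false).mem_iff
  obtain ⟨hMmem, hMmax⟩ := maxD_spec xs hne
  set M := PySem.List.maxD xs PySem.Str.len "" with hM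
  set L := S.getLastD "" with hL
  have hML : M.toList <+: L.toList :=
    chain_all_prefix_last S hchain M ((hmemS M).mpr hMmem)
  have hLlen : PySem.Str.len L ≤ PySem.Str.len M :=
    hMmax L ((hmemS L).mp (getLastD_mem_of_ne_nil S hSne))
  rw [← String.toList_inj]
  exact (hML.eq_of_length_le (by simpa [PySem.Str.len] using hLlen)).symm

theorem len_revS (s : String) : PySem.Str.len (revS s) = PySem.Str.len s := by
  simp [PySem.Str.len, revS_toList]

theorem revS_revS (s : String) : revS (revS s) = s := by
  rw [← String.toList_inj]
  simp [revS_toList]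

theorem maxD_map_revS (xs : List String) :
    PySem.List.maxD (xs.map revS) PySem.Str.len "" = revS (PySem.List.maxD xs PySem.Str.len "") := by
  have hf : (fun x => PySem.Str.len (revS x)) = PySem.Str.len := funext len_revS
  unfold PySem.List.maxD
  rw [max?_map revS PySem.Str.len xs, hf]
  cases PySem.List.max? xs PySem.Str.len with
  | none =>
    rw [← String.toList_inj]
    simp [revS_toList]
  | some m => rfl

theorem map_slice_eq (l : List (List String)) :
    l.map (fun q => (PySem.Str.slice? (q.getLastD "") none none (-1)).getD "")
      = (l.map (fun q => q.getLastD "")).map revS := by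
  rw [List.map_map]
  exact List.map_congr_left (fun q _ => rfl)

theorem canon_eq_alt (a : List String) : canonSol a = solution_alt a := by
  simp only [canonSol, solution_alt]
  set parts := a.map (fun p => (PySem.Str.split? p "*").getD []) with hparts
  set prefixes := parts.map (fun q => q.headD "") with hprefixes
  set suffixes := parts.map (fun q => q.getLastD "") with hsuffixes
  rw [map_slice_eq parts, ← hsuffixes]
  set H := PySem.List.maxD prefixes PySem.Str.len "" with hH
  set T := PySem.List.maxD suffixes PySem.Str.len "" with hT
  have hcond1 : chainOkB (PySem.List.sorted prefixes PySem.Str.len false)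
      = prefixes.all (fun p => PySem.Str.startswith H p) := by
    rw [Bool.eq_iff_iff, sortedChain_iff, List.all_eq_true]
    constructor
    · intro h p hp
      rw [PySem.Str.startswith_eq, PySem.Chars.startswith_iff]
      exact h p hp
    · intro h p hp
      have := h p hp
      rwa [PySem.Str.startswith_eq, PySem.Chars.startswith_iff] at this
  have hcond2 : chainOkB (PySem.List.sorted (suffixes.map revS) PySem.Str.len false)
      = suffixes.all (fun s => PySem.Str.endswith T s) := by
    rw [Bool.eq_iff_iff, sortedChain_iff, List.all_eq_true]
    have hMr : PySem.List.maxD (suffixes.map revS) PySem.Str.len "" = revS T := maxD_map_revS suffixes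
    rw [hMr]
    constructor
    · intro h s hs
      have := h (revS s) (List.mem_map_of_mem hs)
      rw [revS_toList, revS_toList, List.reverse_prefix] at this
      rw [PySem.Str.endswith_eq, PySem.Chars.endswith_iff]
      exact this
    · intro h p hp
      obtain ⟨s, hs, rfl⟩ := List.mem_map.mp hp
      have := h s hs
      rw [PySem.Str.endswith_eq, PySem.Chars.endswith_iff] at this
      rw [revS_toList, revS_toList, List.reverse_prefix]
      exact this
  rw [hcond1, hcond2]
  by_cases h1 : prefixes.all (fun p => PySem.Str.startswith H p) = true
  · rw [h1]
    by_cases h2 : suffixes.all (fun s => PySem.Str.endswith T s) = true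
    · rw [h2]
      simp only [Bool.not_true, Bool.false_eq_true, if_false]
      by_cases hnil : a = []
      · subst hnil
        rfl
      · have hpne : prefixes ≠ [] := by
          simp [hprefixes, hparts, hnil]
        have hsne : suffixes ≠ [] := by
          simp [hsuffixes, hparts, hnil]
        have hsne' : suffixes.map revS ≠ [] := by simp [hsne]
        have hallpre : ∀ p ∈ prefixes, p.toList <+: H.toList := by
          intro p hp
          have := List.all_eq_true.mp h1 p hp
          rwa [PySem.Str.startswith_eq, PySem.Chars.startswith_iff] at this
        have hallsuf : ∀ p ∈ suffixes.map revS,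
            p.toList <+: (PySem.List.maxD (suffixes.map revS) PySem.Str.len "").toList := by
          intro p hp
          obtain ⟨s, hs, rfl⟩ := List.mem_map.mp hp
          have := List.all_eq_true.mp h2 s hs
          rw [PySem.Str.endswith_eq, PySem.Chars.endswith_iff] at this
          rw [maxD_map_revS, revS_toList, revS_toList, List.reverse_prefix]
          exact this
        have hEmpty1 : (PySem.List.sorted prefixes PySem.Str.len false).isEmpty = false := by
          rw [List.isEmpty_eq_false_iff]
          intro hx
          exact hpne ((PySem.List.sorted_eq_nil_iff prefixes PySem.Str.len false).mp hx)
        have hEmpty2 : (PySem.List.sorted (suffixes.map revS) PySem.Str.len false).isEmpty = false := by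
          rw [List.isEmpty_eq_false_iff]
          intro hx
          exact hsne' ((PySem.List.sorted_eq_nil_iff (suffixes.map revS) PySem.Str.len false).mp hx)
        rw [hEmpty1, hEmpty2]
        simp only [Bool.false_eq_true, if_false]
        rw [sortedLast_eq prefixes hpne hallpre,
            sortedLast_eq (suffixes.map revS) hsne' hallsuf, maxD_map_revS]
        have hfin : (PySem.Str.slice? (revS (PySem.List.maxD suffixes PySem.Str.len "")) none none (-1)).getD ""
            = revS (revS (PySem.List.maxD suffixes PySem.Str.len "")) := rfl
        rw [hfin, revS_revS, ← hH, ← hT]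
    · have h2f : suffixes.all (fun s => PySem.Str.endswith T s) = false := by
        cases hx : suffixes.all (fun s => PySem.Str.endswith T s)
        · rfl
        · exact absurd hx h2
      rw [h2f]
      rfl
  · have h1f : prefixes.all (fun p => PySem.Str.startswith H p) = false := by
      cases hx : prefixes.all (fun p => PySem.Str.startswith H p)
      · rfl
      · exact absurd hx h1
    rw [h1f]
    rfl

-- ===== VERDICT (by name: the statement is the Claim_ definition above) =====
theorem solution_spec : Claim_equal_solution := by
  intro a _
  unfold Spec_solution
  exact (solution_eq_canon a).trans (canon_eq_alt a)
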